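-- pv_equiv track=rewrite | github.com/steffi101/job-agent | config.py | is_relevant_experience_level
-- ===== SOURCE A (Python) =====
-- EXPERIENCE_INCLUDE = [
--     "new grad",
--     "entry level",
--     "entry-level",
--     "early career",
--     "associate",
--     "junior",
--     "level 1",
--     "level 2",
--     "l1",
--     "l2",
--     "0-2 years",
--     "1-2 years",
--     "0-3 years",
--     "recent graduate",
--     "university grad",
--     "college grad",
-- ]
--
-- EXPERIENCE_EXCLUDE = [
--     "senior",
--     "staff",
--     "principal",
--     "lead",
--     "director",
--     "vp",
--     "vice president",
--     "head of",
--     "5+ years",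
--     "7+ years",
--     "10+ years",
--     "manager of managers",
-- ]
--
-- def is_relevant_experience_level(description):
--     """Check if job description indicates entry-level"""
--     desc_lower = description.lower()
--
--     # Check for exclusions
--     for exclude in EXPERIENCE_EXCLUDE:
--         if exclude in desc_lower:
--             # But check if it's negated or in a different context
--             # Simple heuristic: if "senior" appears but so does "new grad", keep it
--             has_include = any(inc in desc_lower for inc in EXPERIENCE_INCLUDE)
--             if not has_include:
--                 return False
--
--     # Check for inclusions
--     for include in EXPERIENCE_INCLUDE:
--         if include in desc_lower:
--             return True
--
--     # Default to True if no strong signals either way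
--     # (we don't want to miss opportunities)
--     return True
-- ===== SOURCE B (Python) =====
-- EXPERIENCE_INCLUDE = ["new grad", "entry level", "entry-level", "early career", "associate", "junior", "level 1", "level 2", "l1", "l2", "0-2 years", "1-2 years", "0-3 years", "recent graduate", "university grad", "college grad"]
--
-- EXPERIENCE_EXCLUDE = ["senior", "staff", "principal", "lead", "director", "vp", "vice president", "head of", "5+ years", "7+ years", "10+ years", "manager of managers"]
--
-- def is_relevant_experience_level(description):
--     """Check if job description indicates entry-level.
--
--     Single left-to-right scan over the text positions: at each position test
--     whether a keyword STARTS there; an include keyword anywhere wins at once,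
--     otherwise relevance is decided by whether any exclude keyword ever started.
--     """
--     desc_lower = description.lower()
--     exc_found = False
--     for i in range(len(desc_lower)):
--         if any(desc_lower.startswith(kw, i) for kw in EXPERIENCE_INCLUDE):
--             return True
--         if not exc_found and any(desc_lower.startswith(kw, i) for kw in EXPERIENCE_EXCLUDE):
--             exc_found = True
--     return not exc_found
-- ===== Notes on version B (the rewrite author's own statement) =====
-- stated objective: alternative
-- what changed: A does keyword-major whole-string substring scans with an exclude loop, a nested any() and early returns; B makes one position-major left-to-right pass over the text, testing at each index whether any keyword starts there, returning True at the first include hit and tracking an exclude-seen flag otherwise (same asymptotic cost, slower constants in Python).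
import Mathlib
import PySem

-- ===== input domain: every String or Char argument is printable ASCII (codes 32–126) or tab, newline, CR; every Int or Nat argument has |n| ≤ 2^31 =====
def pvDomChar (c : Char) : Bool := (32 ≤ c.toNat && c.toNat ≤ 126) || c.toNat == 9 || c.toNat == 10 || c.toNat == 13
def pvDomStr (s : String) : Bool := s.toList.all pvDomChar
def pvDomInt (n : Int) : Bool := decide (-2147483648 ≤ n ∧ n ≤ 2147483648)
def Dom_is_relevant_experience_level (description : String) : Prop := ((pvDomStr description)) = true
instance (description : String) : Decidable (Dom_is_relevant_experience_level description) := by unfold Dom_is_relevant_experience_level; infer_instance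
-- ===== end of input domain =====

-- B replaces A's keyword-major substring scans and early-return exclude loop by a single
-- position-major left-to-right pass testing which keywords START at each index (alternative decomposition).
-- ===== PORT A =====
def pvExpInclude : List String := ["new grad", "entry level", "entry-level", "early career", "associate", "junior", "level 1", "level 2", "l1", "l2", "0-2 years", "1-2 years", "0-3 years", "recent graduate", "university grad", "college grad"]

def pvExpExclude : List String := ["senior", "staff", "principal", "lead", "director", "vp", "vice president", "head of", "5+ years", "7+ years", "10+ years", "manager of managers"]

-- A's first loop: scans EXPERIENCE_EXCLUDE; 'some false' models the early 'return False'
def pvAExcludeLoop (descLower : String) : List String → Option Bool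
  | [] => none
  | exclude :: rest =>
    if PySem.Str.isIn exclude descLower then
      let has_include := pvExpInclude.any (fun inc => PySem.Str.isIn inc descLower)
      if !has_include then some false else pvAExcludeLoop descLower rest
    else pvAExcludeLoop descLower rest

-- A's second loop: scans EXPERIENCE_INCLUDE with early 'return True', then 'return True'
def pvAIncludeLoop (descLower : String) : List String → Bool
  | [] => true
  | include_ :: rest =>
    if PySem.Str.isIn include_ descLower then true else pvAIncludeLoop descLower rest

def is_relevant_experience_level (description : String) : Bool :=
  let desc_lower := PySem.Str.lower description
  match pvAExcludeLoop desc_lower pvExpExclude with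
  | some b => b
  | none => pvAIncludeLoop desc_lower pvExpInclude

-- ===== PORT B =====
-- B's single pass over the text positions: the recursion walks the suffixes of desc_lower
-- (suffix at position i = drop i), so 'desc_lower.startswith(kw, i)' is 'kw.toList <+: suffix'
-- (exact: List.isPrefixOf = Python str.startswith with a start index).
def pvBScan (excFound : Bool) : List Char → Bool
  | [] => !excFound
  | c :: rest =>
    if pvExpInclude.any (fun kw => kw.toList.isPrefixOf (c :: rest)) then true
    else
      let excFound' := excFound || pvExpExclude.any (fun kw => kw.toList.isPrefixOf (c :: rest))
      pvBScan excFound' rest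

def is_relevant_experience_level_alt (description : String) : Bool :=
  let desc_lower := PySem.Str.lower description
  pvBScan false desc_lower.toList

-- ===== PRECONDITION & SPEC =====
def Spec_is_relevant_experience_level (description : String) (out : Bool) : Prop := out = is_relevant_experience_level_alt description
instance (description : String) (out : Bool) : Decidable (Spec_is_relevant_experience_level description out) := by unfold Spec_is_relevant_experience_level; infer_instance

-- ===== CLAIM (what is proved, stated in full; the proofs are below) =====
def Claim_equal_is_relevant_experience_level : Prop := ∀ (description : String), Dom_is_relevant_experience_level description → Spec_is_relevant_experience_level description (is_relevant_experience_level description)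

-- ===== LEMMAS AND PROOFS =====
-- any-keyword substring test, on the List Char side
def pvAnyIn (L : List String) (s : List Char) : Bool :=
  L.any (fun kw => PySem.Chars.isIn kw.toList s)

theorem pvAnyIn_nil (L : List String) (h : ∀ kw ∈ L, kw.toList ≠ []) : pvAnyIn L [] = false := by
  simp only [pvAnyIn, List.any_eq_false]
  intro kw hkw
  simp [PySem.Chars.isIn_eq_false_iff, List.infix_nil, h kw hkw]

theorem pvIsIn_cons (kw : List Char) (c : Char) (rest : List Char) :
    PySem.Chars.isIn kw (c :: rest) = (kw.isPrefixOf (c :: rest) || PySem.Chars.isIn kw rest) := by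
  rw [Bool.eq_iff_iff]
  simp [PySem.Chars.isIn_iff_infix, List.infix_cons_iff, List.isPrefixOf_iff_prefix]

theorem pvAnyIn_cons (L : List String) (c : Char) (rest : List Char) :
    pvAnyIn L (c :: rest) =
      (L.any (fun kw => kw.toList.isPrefixOf (c :: rest)) || pvAnyIn L rest) := by
  induction L with
  | nil => rfl
  | cons kw L ih =>
    rw [Bool.eq_iff_iff]
    simp only [pvAnyIn, List.any_cons, pvIsIn_cons] at *
    rw [ih]
    simp only [Bool.or_eq_true]
    tauto

theorem pvBScan_eq (s : List Char) (ex : Bool) :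
    pvBScan ex s = (pvAnyIn pvExpInclude s || !(ex || pvAnyIn pvExpExclude s)) := by
  induction s generalizing ex with
  | nil =>
    rw [pvAnyIn_nil pvExpInclude (by decide), pvAnyIn_nil pvExpExclude (by decide)]
    simp [pvBScan]
  | cons c rest ih =>
    rw [pvAnyIn_cons, pvAnyIn_cons]
    simp only [pvBScan]
    by_cases hinc : pvExpInclude.any (fun kw => kw.toList.isPrefixOf (c :: rest)) = true
    · simp [hinc]
    · simp only [Bool.not_eq_true] at hinc
      simp only [hinc, ih, Bool.false_or]
      by_cases hx : ex = true <;>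
        by_cases hep : pvExpExclude.any (fun kw => kw.toList.isPrefixOf (c :: rest)) = true <;>
          simp_all

theorem pvAIncludeLoop_true (d : String) (l : List String) : pvAIncludeLoop d l = true := by
  induction l with
  | nil => rfl
  | cons x xs ih => simp [pvAIncludeLoop, ih]

theorem pvAExcludeLoop_eq (d : String) (l : List String) :
    pvAExcludeLoop d l =
      (if l.any (fun e => PySem.Str.isIn e d) && !(pvExpInclude.any (fun inc => PySem.Str.isIn inc d))
       then some false else none) := by
  induction l with
  | nil => rfl
  | cons x xs ih =>
    simp only [pvAExcludeLoop, List.any_cons, ih]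
    by_cases hx : PySem.Str.isIn x d = true <;>
      by_cases hi : pvExpInclude.any (fun inc => PySem.Str.isIn inc d) = true <;>
        simp_all

theorem pvStrAny_eq_pvAnyIn (L : List String) (d : String) :
    L.any (fun kw => PySem.Str.isIn kw d) = pvAnyIn L d.toList := by
  simp [pvAnyIn, PySem.Str.isIn_eq]

-- ===== VERDICT (by name: the statement is the Claim_ definition above) =====
theorem is_relevant_experience_level_spec : Claim_equal_is_relevant_experience_level := by
  intro description _
  unfold Spec_is_relevant_experience_level is_relevant_experience_level is_relevant_experience_level_alt
  simp only [pvAExcludeLoop_eq, pvAIncludeLoop_true, pvBScan_eq, pvStrAny_eq_pvAnyIn, Bool.false_or]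
  rcases Bool.eq_false_or_eq_true (pvAnyIn pvExpInclude (PySem.Chars.lower description.toList)) with hi | hi <;>
    rcases Bool.eq_false_or_eq_true (pvAnyIn pvExpExclude (PySem.Chars.lower description.toList)) with he | he <;>
      simp [hi, he]
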